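-- pv_equiv track=rewrite | github.com/pskv/Python-Projects | Small_tasks_for_practice/Enigma.py | rotor
-- ===== SOURCE A (Python) =====
-- rotdict = {1: ('AELTPHQXRU', 'BKNW', 'CMOY', 'DFG', 'IV', 'JZ', 'S'),
--            2: ('FIXVYOMW', 'CDKLHUP', 'ESZ', 'BJ', 'GR', 'NT', 'A', 'Q'),
--            3: ('ABDHPEJT', 'CFLVMZOYQIRWUKXSG', 'N'),
--            4: ('AEPLIYWCOXMRFZBSTGJQNH', 'DV', 'KU'),
--            5: ('AVOLDRWFIUQ', 'BZKSMNHYC', 'EGTJPX'),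
--            6: ('AJQDVLEOZWIYTS', 'CGMNHFUX', 'BPRK'),
--            7: ('ANOUPFRIMBZTLWKSVEGCJYDHXQ'),
--            8: ('AFLSETWUNDHOZVICQ', 'BKJ', 'GXY', 'MPR'),
--            'beta': ('ALBEVFCYODJWUGNMQTZSKPR', 'HIX'),
--            'gamma': ('AFNIRLBSQWVXGUZDKMTPCOYJHE'),
--            }
--
-- def rotor(symbol, n, reverse=False):
--     if n == 0:
--         return symbol
--     for seq in rotdict[n]:
--         if symbol in seq:
--             seq_len = len(seq)
--             if reverse:
--                 pos = seq.index(symbol)-1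
--             else:
--                 pos = (seq.index(symbol)+1) % seq_len
--             return seq[pos]
-- ===== SOURCE B (Python) =====
-- # Forward/backward neighbour tables, built once at module load from the same cycle
-- # data as A's rotdict: for each rotor key and each cycle position, the successor (_FWD)
-- # and predecessor (_BWD) character.  A call is then a single dict lookup -- no scan
-- # over the cycle strings and no .index.  Covers every key of rotdict, including the
-- # string keys 'beta' and 'gamma' and the one-string entries 7/'gamma' whose characters
-- # Python iterates as length-1 cycles (each letter maps to itself), exactly as in A.
--
-- _ROTDICT = {1: ('AELTPHQXRU', 'BKNW', 'CMOY', 'DFG', 'IV', 'JZ', 'S'),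
--             2: ('FIXVYOMW', 'CDKLHUP', 'ESZ', 'BJ', 'GR', 'NT', 'A', 'Q'),
--             3: ('ABDHPEJT', 'CFLVMZOYQIRWUKXSG', 'N'),
--             4: ('AEPLIYWCOXMRFZBSTGJQNH', 'DV', 'KU'),
--             5: ('AVOLDRWFIUQ', 'BZKSMNHYC', 'EGTJPX'),
--             6: ('AJQDVLEOZWIYTS', 'CGMNHFUX', 'BPRK'),
--             7: ('ANOUPFRIMBZTLWKSVEGCJYDHXQ'),
--             8: ('AFLSETWUNDHOZVICQ', 'BKJ', 'GXY', 'MPR'),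
--             'beta': ('ALBEVFCYODJWUGNMQTZSKPR', 'HIX'),
--             'gamma': ('AFNIRLBSQWVXGUZDKMTPCOYJHE'),
--             }
--
-- _FWD = {}
-- _BWD = {}
-- for _n, _seqs in _ROTDICT.items():
--     _f, _b = {}, {}
--     for _seq in _seqs:          # a bare string iterates its characters, as in A
--         _m = len(_seq)
--         for _i, _c in enumerate(_seq):
--             _f[_c] = _seq[(_i + 1) % _m]
--             _b[_c] = _seq[_i - 1]
--     _FWD[_n] = _f
--     _BWD[_n] = _b
-- del _n, _seqs, _f, _b, _seq, _m, _i, _c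
--
--
-- def rotor(symbol, n, reverse=False):
--     if n == 0:
--         return symbol
--     return (_BWD if reverse else _FWD)[n].get(symbol)
-- ===== Notes on version B (the rewrite author's own statement) =====
-- stated objective: simpler
-- what changed: A scans the cycle strings of rotdict[n] on every call with a substring test plus .index; B builds forward/backward neighbour tables once at module load (each character mapped to its successor/predecessor in its cycle, for every key of rotdict including 'beta'/'gamma' and the one-string entries 7/'gamma'), so a call is a single dict lookup and B matches A on all of A's keys; the Lean claim covers the Int-typed n the task's type convention fixes (0..8), with Pre_ excluding only Int n where A raises KeyError.
-- intended difference: On symbols that are not a single character but are a substring of some cycle of rotor n (including the empty string), A's 'symbol in seq' matches accidentally and returns a neighbour character of that occurrence (e.g. rotor('', 1) == 'E', rotor('AE', 1) == 'E'); B returns None there, the intended answer for anything that is not a single rotor symbol. — e.g. on rotor("", 1, false): A returns some "E", B returns none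
import Mathlib
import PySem

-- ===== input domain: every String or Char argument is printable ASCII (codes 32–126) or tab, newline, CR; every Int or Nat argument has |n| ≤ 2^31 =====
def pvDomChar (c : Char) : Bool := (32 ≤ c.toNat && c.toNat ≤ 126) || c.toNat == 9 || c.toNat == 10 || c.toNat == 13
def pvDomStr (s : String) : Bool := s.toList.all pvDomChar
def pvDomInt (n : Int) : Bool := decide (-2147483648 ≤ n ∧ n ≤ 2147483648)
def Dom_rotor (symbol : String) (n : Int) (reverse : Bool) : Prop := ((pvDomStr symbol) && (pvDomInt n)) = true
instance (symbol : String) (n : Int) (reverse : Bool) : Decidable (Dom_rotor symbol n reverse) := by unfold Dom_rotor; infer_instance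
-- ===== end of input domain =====

-- B replaces A's per-call scan over the cycle strings (substring test + .index) by neighbour tables
-- built once at module load: a call is a single dict lookup.  In Python, B matches A on EVERY key of
-- rotdict, including the string keys 'beta'/'gamma'; the task's type convention fixes n : Int in
-- these Lean signatures, so those string keys cannot be expressed here and the formal claim covers
-- the integer keys 0..8.

-- ===== PORT A =====
-- rotdict[n] for an Int key (the string keys 'beta'/'gamma' are not Int values and so do not occur
-- in this Int-typed port).  rotdict[7] is a plain string (no comma), so Python iterates its
-- CHARACTERS: modelled as the list of its one-char strings.  For Int n outside {0,1,…,8} Python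
-- raises KeyError: [] here, excluded by Pre_rotor.
def pvRotdictA (n : Int) : List String :=
  if n == 1 then ["AELTPHQXRU", "BKNW", "CMOY", "DFG", "IV", "JZ", "S"]
  else if n == 2 then ["FIXVYOMW", "CDKLHUP", "ESZ", "BJ", "GR", "NT", "A", "Q"]
  else if n == 3 then ["ABDHPEJT", "CFLVMZOYQIRWUKXSG", "N"]
  else if n == 4 then ["AEPLIYWCOXMRFZBSTGJQNH", "DV", "KU"]
  else if n == 5 then ["AVOLDRWFIUQ", "BZKSMNHYC", "EGTJPX"]
  else if n == 6 then ["AJQDVLEOZWIYTS", "CGMNHFUX", "BPRK"]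
  else if n == 7 then ["A","N","O","U","P","F","R","I","M","B","Z","T","L","W","K","S","V","E","G","C","J","Y","D","H","X","Q"]
  else if n == 8 then ["AFLSETWUNDHOZVICQ", "BKJ", "GXY", "MPR"]
  else []

-- the 'for seq in rotdict[n]' loop; 'symbol in seq' is Python's SUBSTRING test, seq.index(symbol)
-- its first index; seq[pos] is in range whenever the branch is taken, so .map covers it exactly
def pvRotorLoop (symbol : String) (reverse : Bool) : List String → Option String
  | [] => none
  | seq :: rest =>
    if PySem.Str.isIn symbol seq then
      let seqLen : Int := PySem.Str.len seq
      let pos : Int := if reverse then PySem.Str.find seq symbol - 1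
                       else PySem.Int.mod (PySem.Str.find seq symbol + 1) seqLen
      (PySem.Str.pyGet? seq pos).map (fun c => String.ofList [c])
    else pvRotorLoop symbol reverse rest

def rotor (symbol : String) (n : Int) (reverse : Bool) : Option String :=
  if n == 0 then some symbol else pvRotorLoop symbol reverse (pvRotdictA n)

-- ===== PORT B =====
-- the module-load table construction of Source B: for each cycle string, each character maps to its
-- cyclic successor (forward) / predecessor (backward).  Source B's string keys 'beta'/'gamma' are not
-- Int values and so have no entry in this Int-keyed port.
def pvCycles (n : Int) : List String := pvRotdictA n

def pvBuildOne (fwd : Bool) (seq : List Char) : List (String × String) :=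
  (PySem.List.enumerate seq).map (fun (i, c) =>
    (String.ofList [c],
     String.ofList [((if fwd then PySem.List.pyGet? seq (PySem.Int.mod (i + 1) seq.length)
                      else PySem.List.pyGet? seq (i - 1)).getD c)]))
     -- the .getD c guard only makes the in-range index total; it is never the value taken

def pvBuildTable (fwd : Bool) (n : Int) : PySem.Dict String String :=
  PySem.Dict.mk ((pvCycles n).foldl (fun acc seq => acc ++ pvBuildOne fwd seq.toList) [])

def rotor_alt (symbol : String) (n : Int) (reverse : Bool) : Option String :=
  if n == 0 then some symbol
  else if 1 ≤ n ∧ n ≤ 8 then (pvBuildTable (!reverse) n).get? symbol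
  else none   -- Python: KeyError at _FWD[n]/_BWD[n], excluded by Pre_rotor

-- ===== PRECONDITION & SPEC =====
-- Pre_ excludes exactly the Int n outside {0,1,…,8}, on which A raises KeyError at rotdict[n]
-- (the non-Int keys 'beta'/'gamma' of the Python dict are outside the Int type of n and hence
-- outside everything stated here; Python B reproduces A on them).
def Pre_rotor (symbol : String) (n : Int) (reverse : Bool) : Prop := n = 0 ∨ (1 ≤ n ∧ n ≤ 8)
instance (symbol : String) (n : Int) (reverse : Bool) : Decidable (Pre_rotor symbol n reverse) := by unfold Pre_rotor; infer_instance
def pvWitness_rotor : String × Int × Bool := ("A", 1, false)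

-- On symbols that are not a single character but occur as a substring of some cycle string of rotor n
-- (including the empty string), A's substring test 'symbol in seq' matches accidentally and A returns
-- a neighbour character of that occurrence; B returns None, the intended answer for anything that is
-- not a single rotor symbol.
def D_rotor (symbol : String) (n : Int) (reverse : Bool) : Prop :=
  (1 ≤ n ∧ n ≤ 8) ∧ symbol.toList.length ≠ 1 ∧ ∃ seq ∈ pvRotdictA n, PySem.Str.isIn symbol seq = true
instance (symbol : String) (n : Int) (reverse : Bool) : Decidable (D_rotor symbol n reverse) := by unfold D_rotor; infer_instance

def Spec_rotor (symbol : String) (n : Int) (reverse : Bool) (out : Option String) : Prop :=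
  ¬ D_rotor symbol n reverse → out = rotor_alt symbol n reverse
instance (symbol : String) (n : Int) (reverse : Bool) (out : Option String) : Decidable (Spec_rotor symbol n reverse out) := by unfold Spec_rotor; infer_instance

def pvDiffWitness_rotor : String × Int × Bool := ("", 1, false)
def pvDiffWitnessOut_rotor : (Option String) × (Option String) := (some "E", none)

-- ===== CLAIM (what is proved, stated in full; the proofs are below) =====
def Claim_unchanged_rotor : Prop := ∀ (symbol : String) (n : Int) (reverse : Bool), Dom_rotor symbol n reverse → Pre_rotor symbol n reverse → Spec_rotor symbol n reverse (rotor symbol n reverse)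
def Claim_changed_rotor : Prop := Dom_rotor (pvDiffWitness_rotor.1) (pvDiffWitness_rotor.2.1) (pvDiffWitness_rotor.2.2) ∧ Pre_rotor (pvDiffWitness_rotor.1) (pvDiffWitness_rotor.2.1) (pvDiffWitness_rotor.2.2) ∧ D_rotor (pvDiffWitness_rotor.1) (pvDiffWitness_rotor.2.1) (pvDiffWitness_rotor.2.2) ∧ rotor (pvDiffWitness_rotor.1) (pvDiffWitness_rotor.2.1) (pvDiffWitness_rotor.2.2) = pvDiffWitnessOut_rotor.1 ∧ rotor_alt (pvDiffWitness_rotor.1) (pvDiffWitness_rotor.2.1) (pvDiffWitness_rotor.2.2) = pvDiffWitnessOut_rotor.2 ∧ pvDiffWitnessOut_rotor.1 ≠ pvDiffWitnessOut_rotor.2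
def Claim_exact_rotor : Prop := ∀ (symbol : String) (n : Int) (reverse : Bool), Dom_rotor symbol n reverse → Pre_rotor symbol n reverse → D_rotor symbol n reverse → rotor symbol n reverse ≠ rotor_alt symbol n reverse

-- ===== LEMMAS AND PROOFS =====

def pvL8 : List Int := [1, 2, 3, 4, 5, 6, 7, 8]

-- B's tables are sound for every key 1..8: every key of the table is a single character, and on
-- each single character the table's answer agrees with A's loop
set_option maxRecDepth 100000 in
set_option maxHeartbeats 1000000 in
theorem pvTables_spec : ∀ n ∈ pvL8, ∀ rev : Bool,
    (∀ kv ∈ (pvBuildTable (!rev) n).items, kv.1.toList.length = 1) ∧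
      ∀ k ∈ List.range 127, pvRotorLoop (String.ofList [Char.ofNat k]) rev (pvRotdictA n) =
        (pvBuildTable (!rev) n).get? (String.ofList [Char.ofNat k]) := by
  decide

theorem pvSeqs_nonempty : ∀ n ∈ pvL8, ∀ seq ∈ pvRotdictA n, 1 ≤ seq.toList.length := by decide

theorem pvLoop_none (s : String) (rev : Bool) :
    ∀ l : List String, (∀ seq ∈ l, PySem.Str.isIn s seq = false) → pvRotorLoop s rev l = none := by
  intro l
  induction l with
  | nil => intro _; rfl
  | cons seq rest ih =>
    intro h
    simp only [pvRotorLoop, h seq (by simp)]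
    simp only [Bool.false_eq_true, if_false]
    exact ih (fun q hq => h q (List.mem_cons_of_mem _ hq))

theorem pvPyGet?_isSome (xs : List Char) (i : Int) (h1 : -(xs.length : Int) ≤ i) (h2 : i < xs.length) :
    (PySem.List.pyGet? xs i).isSome = true := by
  unfold PySem.List.pyGet? PySem.List.pyIdx?
  by_cases h3 : 0 ≤ i
  · rw [if_pos h3, if_pos h2]
    simp [List.getElem?_eq_getElem (show i.toNat < xs.length by omega)]
  · rw [if_neg h3, if_pos h1]
    simp [List.getElem?_eq_getElem (show xs.length - (-i).toNat < xs.length by omega)]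

theorem pvLoop_some (s : String) (rev : Bool) (l : List String)
    (hne : ∀ seq ∈ l, 1 ≤ seq.toList.length)
    (hex : ∃ seq ∈ l, PySem.Str.isIn s seq = true) :
    ∃ v, pvRotorLoop s rev l = some v := by
  induction l with
  | nil => simp at hex
  | cons seq rest ih =>
    by_cases hin : PySem.Str.isIn s seq = true
    · have hlen : 1 ≤ seq.toList.length := hne seq (by simp)
      have hf0 : 0 ≤ PySem.Str.find seq s :=
        (PySem.Str.find_nonneg_iff seq s).mpr ((PySem.Str.isIn_iff_infix s seq).mp hin)
      have hfle : PySem.Str.find seq s ≤ (seq.toList.length : Int) := by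
        rw [PySem.Str.find_eq]; exact PySem.Chars.find_le_length _ _
      have hlenI : (0 : Int) < (seq.toList.length : Int) := by exact_mod_cast hlen
      have hsome : (PySem.Str.pyGet? seq (if rev then PySem.Str.find seq s - 1
          else PySem.Int.mod (PySem.Str.find seq s + 1) (PySem.Str.len seq))).isSome = true := by
        unfold PySem.Str.pyGet?
        rw [PySem.Chars.pyGet?_eq_listPyGet?, PySem.Str.len_eq]
        apply pvPyGet?_isSome
        · cases rev with
          | false =>
            simp only [if_false, Bool.false_eq_true]
            have := PySem.Int.mod_nonneg (PySem.Str.find seq s + 1) (b := (seq.toList.length : Int)) hlenI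
            omega
          | true => simp only [if_true]; omega
        · cases rev with
          | false =>
            simp only [if_false, Bool.false_eq_true]
            have := PySem.Int.mod_lt (PySem.Str.find seq s + 1) (b := (seq.toList.length : Int)) hlenI
            omega
          | true => simp only [if_true]; omega
      obtain ⟨c, hc⟩ := Option.isSome_iff_exists.mp hsome
      refine ⟨String.ofList [c], ?_⟩
      simp only [pvRotorLoop, hin, if_true]
      rw [hc]; rfl
    · obtain ⟨q, hq, hqin⟩ := hex
      rcases List.mem_cons.mp hq with rfl | hq'
      · exact absurd hqin hin
      · obtain ⟨v, hv⟩ := ih (fun q hq => hne q (List.mem_cons_of_mem _ hq)) ⟨q, hq', hqin⟩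
        refine ⟨v, ?_⟩
        simp only [pvRotorLoop, hin]
        simp only [Bool.false_eq_true, if_false]
        exact hv

-- a dict whose keys are all single characters answers none to any symbol that is not one
theorem pvGet?_none_of_len (s : String) (hs : s.toList.length ≠ 1) :
    ∀ items : List (String × String), (∀ kv ∈ items, kv.1.toList.length = 1) →
      (PySem.Dict.mk items).get? s = none := by
  intro items
  induction items with
  | nil => intro _; simp [PySem.Dict.get?]
  | cons kv rest ih =>
    intro h
    rw [show (kv :: rest) = (kv.1, kv.2) :: rest by simp, PySem.Dict.get?_mk_cons]
    have hk1 : kv.1.toList.length = 1 := h kv (by simp)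
    have hne : (kv.1 == s) ≠ true := by
      intro hbeq
      exact hs (eq_of_beq hbeq ▸ hk1)
    simp only [hne, if_false, Bool.false_eq_true]
    exact ih (fun p hp => h p (List.mem_cons_of_mem _ hp))

theorem pvMemL8 (n : Int) (h1 : 1 ≤ n) (h8 : n ≤ 8) : n ∈ pvL8 := by
  simp only [pvL8, List.mem_cons]; omega

theorem pvSingleChar (s : String) (hdom : pvDomStr s = true) (hlen : s.toList.length = 1) :
    ∃ k, k ∈ List.range 127 ∧ s = String.ofList [Char.ofNat k] := by
  obtain ⟨c, hc⟩ : ∃ c, s.toList = [c] := by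
    cases hsl : s.toList with
    | nil => rw [hsl] at hlen; simp at hlen
    | cons a t =>
      cases t with
      | nil => exact ⟨a, rfl⟩
      | cons b u => rw [hsl] at hlen; simp at hlen
  have hcd : pvDomChar c = true := (List.all_eq_true.mp hdom) c (by rw [hc]; simp)
  have hlt : c.toNat < 127 := by
    unfold pvDomChar at hcd
    simp only [Bool.or_eq_true, Bool.and_eq_true, decide_eq_true_eq, beq_iff_eq] at hcd
    omega
  refine ⟨c.toNat, List.mem_range.mpr hlt, ?_⟩
  rw [Char.ofNat_toNat, ← hc, String.ofList_toList]

-- for 1 ≤ n ≤ 8 rotor_alt is the table lookup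
theorem pvAlt_eq (s : String) (n : Int) (rev : Bool) (h1 : 1 ≤ n) (h8 : n ≤ 8) :
    rotor_alt s n rev = (pvBuildTable (!rev) n).get? s := by
  unfold rotor_alt
  have hn0 : (n == 0) = false := by simp; omega
  rw [hn0]
  simp only [Bool.false_eq_true, if_false]
  rw [if_pos ⟨h1, h8⟩]

-- ===== VERDICT (by name: the statement is the Claim_ definition above) =====
theorem rotor_spec : Claim_unchanged_rotor := by
  intro s n rev hdom hpre hnd
  rcases hpre with h0 | ⟨h1, h8⟩
  · subst h0; simp [rotor, rotor_alt]
  · have hmem := pvMemL8 n h1 h8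
    have hspec := pvTables_spec n hmem rev
    have hn0 : (n == 0) = false := by simp; omega
    have hrot : rotor s n rev = pvRotorLoop s rev (pvRotdictA n) := by
      unfold rotor; rw [hn0]; simp
    rw [hrot, pvAlt_eq s n rev h1 h8]
    have hdomS : pvDomStr s = true := by
      unfold Dom_rotor at hdom; simp only [Bool.and_eq_true] at hdom; exact hdom.1
    by_cases hlen : s.toList.length = 1
    · obtain ⟨k, hk, hs⟩ := pvSingleChar s hdomS hlen
      rw [hs]
      exact hspec.2 k hk
    · have hnosub : ∀ seq ∈ pvRotdictA n, PySem.Str.isIn s seq = false := by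
        intro seq hseq
        by_contra hcon
        have htrue : PySem.Str.isIn s seq = true := by
          cases h : PySem.Str.isIn s seq with
          | false => exact absurd h hcon
          | true => rfl
        exact hnd ⟨⟨h1, h8⟩, hlen, seq, hseq, htrue⟩
      rw [pvLoop_none s rev _ hnosub]
      cases ht : pvBuildTable (!rev) n with
      | mk items =>
        refine (pvGet?_none_of_len s hlen items ?_).symm
        have := hspec.1
        rw [ht] at this
        exact this

theorem rotor_changed : Claim_changed_rotor := by unfold Claim_changed_rotor; decide

theorem rotor_tight : Claim_exact_rotor := by
  intro s n rev _ _ hd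
  obtain ⟨⟨h1, h8⟩, hlen, hex⟩ := hd
  have hmem := pvMemL8 n h1 h8
  have hspec := pvTables_spec n hmem rev
  have hn0 : (n == 0) = false := by simp; omega
  have hrot : rotor s n rev = pvRotorLoop s rev (pvRotdictA n) := by
    unfold rotor; rw [hn0]; simp
  obtain ⟨v, hv⟩ := pvLoop_some s rev (pvRotdictA n) (pvSeqs_nonempty n hmem) hex
  have halt : rotor_alt s n rev = none := by
    rw [pvAlt_eq s n rev h1 h8]
    cases ht : pvBuildTable (!rev) n with
    | mk items =>
      refine pvGet?_none_of_len s hlen items ?_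
      have := hspec.1
      rw [ht] at this
      exact this
  rw [hrot, hv, halt]
  simp
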